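-- pv_equiv track=rewrite | github.com/aquarellian/adventofcode2018 | src/AoC2020/d19.py | split_rule
-- ===== SOURCE A (Python) =====
-- def split_rule(s):
--     if '((' in s:
--         part1 = s[:s.index('((')]
--         part2 = s[s.index('(('):s.index(')+)') +3]
--         part3 = s[s.index(')+)') +3:]
--         arr = split_rule(part1) + [part2] + split_rule(part3)
--         while '' in arr:
--             arr.remove('')
--         return arr
--     else:
--         return s.split('|')
-- ===== SOURCE B (Python) =====
-- def split_rule(s):
--     tokens = []
--     rem = s
--     found = False
--     while '((' in rem:
--         found = True
--         idx = rem.index('((')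
--         close = rem.index(')+)') + 3
--         tokens.extend(rem[:idx].split('|'))
--         tokens.append(rem[idx:close])
--         rem = rem[close:]
--     tokens.extend(rem.split('|'))
--     if found:
--         tokens = [t for t in tokens if t]
--     return tokens
-- ===== Notes on version B (the rewrite author's own statement) =====
-- stated objective: simpler
-- what changed: Replaces A's recursion (which re-splits each segment and runs a quadratic remove('') pass at every recursion level) by a single left-to-right loop over the string with a token accumulator and one final filter of empty tokens, applied only when a group was found.
import Mathlib
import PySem

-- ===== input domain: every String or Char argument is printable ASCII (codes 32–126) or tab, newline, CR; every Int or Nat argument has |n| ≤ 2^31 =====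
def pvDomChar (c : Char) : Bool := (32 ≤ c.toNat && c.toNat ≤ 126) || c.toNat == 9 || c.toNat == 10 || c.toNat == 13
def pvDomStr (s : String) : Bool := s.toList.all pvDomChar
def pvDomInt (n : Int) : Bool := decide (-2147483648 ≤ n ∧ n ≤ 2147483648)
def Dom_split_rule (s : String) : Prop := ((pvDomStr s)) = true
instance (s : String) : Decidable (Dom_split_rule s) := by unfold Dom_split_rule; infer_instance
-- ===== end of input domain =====

-- B replaces A's recursion (with a '' -removal pass at every level) by one left-to-right loop over the
-- string with a token accumulator and a single final filter: a different decomposition of the same task.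

-- ===== PORT A =====
-- 'while '' in arr: arr.remove('')' — repeatedly remove the first '' while one is present
-- arr.remove('') with '' ∈ arr erases the first occurrence: List.erase (PySem.List.remove?_eq_some_erase)
def pvRemoveEmpties (arr : List (List Char)) : List (List Char) :=
  if h : ([] : List Char) ∈ arr then pvRemoveEmpties (arr.erase ([] : List Char)) else arr
termination_by arr.length
decreasing_by
  have h1 := List.length_erase_of_mem h
  have h2 := List.length_pos_of_mem h
  omega

-- recursive splitter of A; the branch returning [] is where Python raises ValueError
-- (')+)' absent while '((' present) — excluded by Pre_split_rule
def pvSplitA (cs : List Char) : List (List Char) :=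
  if h : PySem.Chars.isIn ['(', '('] cs then
    if h3 : PySem.Chars.find cs [')', '+', ')'] = -1 then
      []  -- s.index(')+)') raises ValueError; outside Pre_split_rule
    else
      pvRemoveEmpties
        (pvSplitA (PySem.List.slice cs none (some (PySem.Chars.find cs ['(', '(']))) ++
         [PySem.List.slice cs (some (PySem.Chars.find cs ['(', '(']))
            (some (PySem.Chars.find cs [')', '+', ')'] + 3))] ++
         pvSplitA (PySem.List.slice cs (some (PySem.Chars.find cs [')', '+', ')'] + 3)) none))
  else
    PySem.Chars.splitOn cs ['|']
termination_by cs.length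
decreasing_by
  · -- part1 = s[:s.index('((')]
    have hf : 0 ≤ PySem.Chars.find cs ['(', '('] :=
      (PySem.Chars.find_nonneg_iff cs _).mpr ((PySem.Chars.isIn_iff_infix _ cs).mp h)
    have hfl : (PySem.Chars.find cs ['(', '(']).toNat < cs.length := by
      have hsp := (PySem.Chars.find_spec hf).1
      have := hsp.length_le
      simp [List.length_drop] at this
      omega
    rw [← Int.toNat_of_nonneg hf, PySem.List.slice_to_natCast]
    simp [List.length_take]
    omega
  · -- part3 = s[s.index(')+)')+3:]
    have hf : 0 ≤ PySem.Chars.find cs [')', '+', ')'] := by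
      have := PySem.Chars.neg_one_le_find cs [')', '+', ')']
      omega
    have hlen : 0 < cs.length := by
      have := ((PySem.Chars.isIn_iff_infix _ cs).mp h).length_le
      simp at this
      omega
    have h3' : PySem.Chars.find cs [')', '+', ')'] + 3 =
        (((PySem.Chars.find cs [')', '+', ')']).toNat + 3 : ℕ) : Int) := by
      push_cast
      rw [Int.toNat_of_nonneg hf]
    rw [h3', PySem.List.slice_from_natCast]
    simp [List.length_drop]
    omega

def split_rule (s : String) : List String := (pvSplitA s.toList).map String.ofList

-- ===== PORT B =====
-- the while-loop of B: rem is the remaining string, tokens the accumulator, found the flag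
def pvSplitBGo (rem : List Char) (tokens : List (List Char)) (found : Bool) : List (List Char) :=
  if h : PySem.Chars.isIn ['(', '('] rem then
    if h3 : PySem.Chars.find rem [')', '+', ')'] = -1 then
      []  -- rem.index(')+)') raises ValueError; outside Pre_split_rule
    else
      pvSplitBGo (PySem.List.slice rem (some (PySem.Chars.find rem [')', '+', ')'] + 3)) none)
        (tokens ++
         PySem.Chars.splitOn (PySem.List.slice rem none (some (PySem.Chars.find rem ['(', '(']))) ['|'] ++
         [PySem.List.slice rem (some (PySem.Chars.find rem ['(', '(']))
            (some (PySem.Chars.find rem [')', '+', ')'] + 3))])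
        true
  else
    if found then (tokens ++ PySem.Chars.splitOn rem ['|']).filter (fun t => t ≠ [])
    else tokens ++ PySem.Chars.splitOn rem ['|']
termination_by rem.length
decreasing_by
  have hf : 0 ≤ PySem.Chars.find rem [')', '+', ')'] := by
    have := PySem.Chars.neg_one_le_find rem [')', '+', ')']
    omega
  have hlen : 0 < rem.length := by
    have := ((PySem.Chars.isIn_iff_infix _ rem).mp h).length_le
    simp at this
    omega
  have h3' : PySem.Chars.find rem [')', '+', ')'] + 3 =
      (((PySem.Chars.find rem [')', '+', ')']).toNat + 3 : ℕ) : Int) := by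
    push_cast
    rw [Int.toNat_of_nonneg hf]
  rw [h3', PySem.List.slice_from_natCast]
  simp [List.length_drop]
  omega

def split_rule_alt (s : String) : List String := (pvSplitBGo s.toList [] false).map String.ofList

-- ===== PRECONDITION & SPEC =====
-- Pre_ excludes exactly the inputs on which A raises ValueError: those with a suffix containing
-- '((' but no ')+)' (there s.index(')+)') fails at some recursion depth).
def Pre_split_rule (s : String) : Prop :=
  ∀ t ∈ s.toList.tails, PySem.Chars.isIn ['(', '('] t = true → PySem.Chars.isIn [')', '+', ')'] t = true
instance (s : String) : Decidable (Pre_split_rule s) := by unfold Pre_split_rule; infer_instance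

def pvWitness_split_rule : String := "1 2|((ab)+)|3 4"

def Spec_split_rule (s : String) (out : List String) : Prop := out = split_rule_alt s
instance (s : String) (out : List String) : Decidable (Spec_split_rule s out) := by unfold Spec_split_rule; infer_instance

-- ===== CLAIM (what is proved, stated in full; the proofs are below) =====
def Claim_equal_split_rule : Prop := ∀ (s : String), Dom_split_rule s → Pre_split_rule s → Spec_split_rule s (split_rule s)

-- ===== LEMMAS AND PROOFS =====

-- list-level precondition
def pvPreC (cs : List Char) : Prop :=
  ∀ t ∈ cs.tails, PySem.Chars.isIn ['(', '('] t = true → PySem.Chars.isIn [')', '+', ')'] t = true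

-- the common token spine both programs produce (proof-side helper)
def pvT (cs : List Char) : List (List Char) :=
  if h : PySem.Chars.isIn ['(', '('] cs then
    if h3 : PySem.Chars.find cs [')', '+', ')'] = -1 then []
    else
      PySem.Chars.splitOn (PySem.List.slice cs none (some (PySem.Chars.find cs ['(', '(']))) ['|'] ++
      [PySem.List.slice cs (some (PySem.Chars.find cs ['(', '(']))
          (some (PySem.Chars.find cs [')', '+', ')'] + 3))] ++
      pvT (PySem.List.slice cs (some (PySem.Chars.find cs [')', '+', ')'] + 3)) none)
  else
    PySem.Chars.splitOn cs ['|']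
termination_by cs.length
decreasing_by
  have hf : 0 ≤ PySem.Chars.find cs [')', '+', ')'] := by
    have := PySem.Chars.neg_one_le_find cs [')', '+', ')']
    omega
  have hlen : 0 < cs.length := by
    have := ((PySem.Chars.isIn_iff_infix _ cs).mp h).length_le
    simp at this
    omega
  have h3' : PySem.Chars.find cs [')', '+', ')'] + 3 =
      (((PySem.Chars.find cs [')', '+', ')']).toNat + 3 : ℕ) : Int) := by
    push_cast
    rw [Int.toNat_of_nonneg hf]
  rw [h3', PySem.List.slice_from_natCast]
  simp [List.length_drop]
  omega

lemma pv_filter_erase {α : Type} [BEq α] [LawfulBEq α] (p : α → Bool) (a : α) (hp : p a = false)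
    (l : List α) : (l.erase a).filter p = l.filter p := by
  induction l with
  | nil => rfl
  | cons x xs ih =>
    by_cases hx : x = a
    · subst hx
      rw [List.erase_cons_head]
      simp [hp]
    · rw [List.erase_cons_tail (by simp [hx])]
      simp only [List.filter_cons, ih]

lemma pvRemoveEmpties_eq_filter (arr : List (List Char)) :
    pvRemoveEmpties arr = arr.filter (fun t => t ≠ []) := by
  induction arr using pvRemoveEmpties.induct with
  | case1 arr h ih =>
    rw [pvRemoveEmpties, dif_pos h, ih]
    exact pv_filter_erase (fun t => decide (t ≠ [])) ([] : List Char) (by decide) arr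
  | case2 arr h =>
    rw [pvRemoveEmpties, dif_neg h]
    refine (List.filter_eq_self.mpr ?_).symm
    intro a ha
    simp only [ne_eq, decide_eq_true_eq]
    rintro rfl
    exact h ha

-- the part before the first '((' contains no '((' itself
lemma pv_no_group_in_part1 (cs : List Char) (h : PySem.Chars.isIn ['(', '('] cs = true) :
    PySem.Chars.isIn ['(', '('] (cs.take (PySem.Chars.find cs ['(', '(']).toNat) = false := by
  set k := (PySem.Chars.find cs ['(', '(']).toNat with hk
  have hf : 0 ≤ PySem.Chars.find cs ['(', '('] :=
    (PySem.Chars.find_nonneg_iff cs _).mpr ((PySem.Chars.isIn_iff_infix _ cs).mp h)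
  by_contra hcon
  have hin : PySem.Chars.isIn ['(', '('] (cs.take k) = true := by
    cases hx : PySem.Chars.isIn ['(', '('] (cs.take k) with
    | false => exact absurd hx hcon
    | true => rfl
  obtain ⟨j, hj⟩ := (PySem.Chars.exists_prefix_drop_iff_isIn _ _).mpr hin
  rw [List.drop_take] at hj
  obtain ⟨hpre, hlen⟩ := List.prefix_take_iff.mp hj
  have hjk : j < k := by simp at hlen; omega
  exact (PySem.Chars.find_spec hf).2 j hjk hpre

-- pvPreC is inherited by every suffix
lemma pvPreC_suffix {cs t : List Char} (h : pvPreC cs) (hs : t <:+ cs) : pvPreC t := by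
  intro u hu
  exact h u ((List.mem_tails _ _).mpr (((List.mem_tails _ _).mp hu).trans hs))

lemma pv_find3_toNat (cs : List Char) (h3 : ¬ PySem.Chars.find cs [')', '+', ')'] = -1) :
    PySem.Chars.find cs [')', '+', ')'] + 3 =
      (((PySem.Chars.find cs [')', '+', ')']).toNat + 3 : ℕ) : Int) := by
  have := PySem.Chars.neg_one_le_find cs [')', '+', ')']
  push_cast
  rw [Int.toNat_of_nonneg (by omega)]

-- A's recursion equals the filtered spine wherever a group is present
lemma pvSplitA_eq_filter_T : ∀ n (cs : List Char), cs.length ≤ n → pvPreC cs →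
    PySem.Chars.isIn ['(', '('] cs = true →
    pvSplitA cs = (pvT cs).filter (fun t => t ≠ []) := by
  intro n
  induction n with
  | zero =>
    intro cs hn _ h
    have hcs : cs = [] := List.length_eq_zero_iff.mp (by omega)
    subst hcs
    have := ((PySem.Chars.isIn_iff_infix _ _).mp h).length_le
    simp at this
  | succ n ih =>
    intro cs hn hpre h
    have hf : 0 ≤ PySem.Chars.find cs ['(', '('] :=
      (PySem.Chars.find_nonneg_iff cs _).mpr ((PySem.Chars.isIn_iff_infix _ cs).mp h)
    have h3 : ¬ PySem.Chars.find cs [')', '+', ')'] = -1 := by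
      have : PySem.Chars.isIn [')', '+', ')'] cs = true :=
        hpre cs ((List.mem_tails _ _).mpr (List.suffix_refl cs)) h
      have := (PySem.Chars.find_ne_neg_one_iff cs _).mpr ((PySem.Chars.isIn_iff_infix _ cs).mp this)
      exact this
    have hf3 : 0 ≤ PySem.Chars.find cs [')', '+', ')'] := by
      have := PySem.Chars.neg_one_le_find cs [')', '+', ')']
      omega
    rw [pvSplitA, pvT]
    rw [dif_pos h, dif_pos h, dif_neg h3, dif_neg h3]
    -- rewrite the three slices
    rw [← Int.toNat_of_nonneg hf, PySem.List.slice_to_natCast, pv_find3_toNat cs h3,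
        PySem.List.slice_from_natCast]
    set p1 := cs.take (PySem.Chars.find cs ['(', '(']).toNat with hp1
    set p2 := PySem.List.slice cs (some ((PySem.Chars.find cs ['(', '(']).toNat : Int))
        (some (((PySem.Chars.find cs [')', '+', ')']).toNat + 3 : ℕ) : Int)) with hp2
    set p3 := cs.drop ((PySem.Chars.find cs [')', '+', ')']).toNat + 3) with hp3
    -- A on part1 is the base case
    have hA1 : pvSplitA p1 = PySem.Chars.splitOn p1 ['|'] := by
      rw [pvSplitA, dif_neg]
      simp [hp1, pv_no_group_in_part1 cs h]
    have hpre3 : pvPreC p3 := pvPreC_suffix hpre (hp3 ▸ List.drop_suffix _ cs)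
    have hlen3 : p3.length ≤ n := by
      have : 0 < cs.length := by
        have := ((PySem.Chars.isIn_iff_infix _ cs).mp h).length_le
        simp at this
        omega
      simp [hp3, List.length_drop]
      omega
    rw [pvRemoveEmpties_eq_filter, hA1]
    by_cases h3in : PySem.Chars.isIn ['(', '('] p3 = true
    · rw [ih p3 hlen3 hpre3 h3in]
      simp only [List.filter_append, List.filter_cons, List.filter_filter, Bool.and_self]
    · rw [pvSplitA, dif_neg (by simp [h3in]), pvT, dif_neg (by simp [h3in])]

-- B's loop with found = true appends the spine of the remainder and filters once at the end
lemma pvSplitBGo_true : ∀ n (rem : List Char), rem.length ≤ n → pvPreC rem →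
    ∀ tokens, pvSplitBGo rem tokens true = (tokens ++ pvT rem).filter (fun t => t ≠ []) := by
  intro n
  induction n with
  | zero =>
    intro rem hn hpre tokens
    have hrem : rem = [] := List.length_eq_zero_iff.mp (by omega)
    subst hrem
    have hno : ¬ PySem.Chars.isIn ['(', '('] ([] : List Char) = true := by
      intro h
      have := ((PySem.Chars.isIn_iff_infix _ _).mp h).length_le
      simp at this
    rw [pvSplitBGo, dif_neg hno, pvT, dif_neg hno]
    simp
  | succ n ih =>
    intro rem hn hpre tokens
    by_cases h : PySem.Chars.isIn ['(', '('] rem = true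
    · have h3 : ¬ PySem.Chars.find rem [')', '+', ')'] = -1 := by
        have : PySem.Chars.isIn [')', '+', ')'] rem = true :=
          hpre rem ((List.mem_tails _ _).mpr (List.suffix_refl rem)) h
        exact (PySem.Chars.find_ne_neg_one_iff rem _).mpr ((PySem.Chars.isIn_iff_infix _ rem).mp this)
      rw [pvSplitBGo, dif_pos h, dif_neg h3, pvT, dif_pos h, dif_neg h3]
      have hlen3 : (PySem.List.slice rem (some (PySem.Chars.find rem [')', '+', ')'] + 3)) none).length ≤ n := by
        rw [pv_find3_toNat rem h3, PySem.List.slice_from_natCast]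
        have : 0 < rem.length := by
          have := ((PySem.Chars.isIn_iff_infix _ rem).mp h).length_le
          simp at this
          omega
        simp [List.length_drop]
        omega
      have hpre3 : pvPreC (PySem.List.slice rem (some (PySem.Chars.find rem [')', '+', ')'] + 3)) none) := by
        rw [pv_find3_toNat rem h3, PySem.List.slice_from_natCast]
        exact pvPreC_suffix hpre (List.drop_suffix _ rem)
      rw [ih _ hlen3 hpre3]
      simp [List.append_assoc]
    · rw [pvSplitBGo, dif_neg h, pvT, dif_neg h]
      simp

lemma pv_main (cs : List Char) (hpre : pvPreC cs) :
    pvSplitA cs = pvSplitBGo cs [] false := by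
  by_cases h : PySem.Chars.isIn ['(', '('] cs = true
  · have h3 : ¬ PySem.Chars.find cs [')', '+', ')'] = -1 := by
      have : PySem.Chars.isIn [')', '+', ')'] cs = true :=
        hpre cs ((List.mem_tails _ _).mpr (List.suffix_refl cs)) h
      exact (PySem.Chars.find_ne_neg_one_iff cs _).mpr ((PySem.Chars.isIn_iff_infix _ cs).mp this)
    have hpre3 : pvPreC (PySem.List.slice cs (some (PySem.Chars.find cs [')', '+', ')'] + 3)) none) := by
      rw [pv_find3_toNat cs h3, PySem.List.slice_from_natCast]
      exact pvPreC_suffix hpre (List.drop_suffix _ cs)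
    rw [pvSplitA_eq_filter_T cs.length cs le_rfl hpre h]
    rw [pvSplitBGo, dif_pos h, dif_neg h3]
    rw [pvSplitBGo_true (PySem.List.slice cs (some (PySem.Chars.find cs [')', '+', ')'] + 3)) none).length _ le_rfl hpre3]
    rw [pvT, dif_pos h, dif_neg h3]
    simp [List.append_assoc]
  · rw [pvSplitA, dif_neg h, pvSplitBGo, dif_neg h]
    simp

-- ===== VERDICT (by name: the statement is the Claim_ definition above) =====
theorem split_rule_spec : Claim_equal_split_rule := by
  intro s _ hpre
  unfold Spec_split_rule split_rule split_rule_alt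
  rw [pv_main s.toList hpre]
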